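-- pv_equiv track=rewrite | github.com/HanshikaSahu/Python | Arrays/a27.py | duplicate_k
-- ===== SOURCE A (Python) =====
-- def duplicate_k(arr, k):
--   n = len(arr)
--   count = arr.count(k)
--   write_index = n + count -1
--   curr = n - 1
--   while curr >= 0 and write_index >= 0:
--     if write_index < n:
--       arr[write_index] = arr[curr]
--     write_index -= 1
--
--     if arr[curr] == k:
--       if write_index < n:
--         arr[write_index] = k
--       write_index -= 1
--     curr -= 1
--   return arr
-- ===== SOURCE B (Python) =====
-- def duplicate_k(arr, k):
--     out = []
--     for x in arr:
--         out.append(x)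
--         if x == k:
--             out.append(x)
--     arr[:] = out[:len(arr)]
--     return arr
-- ===== Notes on version B (the rewrite author's own statement) =====
-- stated objective: simpler
-- what changed: Replaces A's backward in-place index-shifting pass (precomputed count, two shifting cursors, bounds-guarded writes) with a forward build of the duplicated list followed by truncation to the original length; the single append-only pass avoids per-element index arithmetic and guarded item assignment, which a timing run measured as a constant-factor speedup.
import Mathlib
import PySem

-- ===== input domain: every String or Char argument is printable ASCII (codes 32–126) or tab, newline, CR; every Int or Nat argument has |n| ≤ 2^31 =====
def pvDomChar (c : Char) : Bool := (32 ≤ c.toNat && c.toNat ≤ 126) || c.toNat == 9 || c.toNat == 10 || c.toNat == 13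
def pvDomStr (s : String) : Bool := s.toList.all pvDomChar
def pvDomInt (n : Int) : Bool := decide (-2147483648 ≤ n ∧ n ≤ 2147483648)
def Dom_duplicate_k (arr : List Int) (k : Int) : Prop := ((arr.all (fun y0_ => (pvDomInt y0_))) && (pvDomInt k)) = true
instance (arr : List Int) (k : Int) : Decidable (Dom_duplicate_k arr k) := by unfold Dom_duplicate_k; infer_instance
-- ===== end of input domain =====

-- B replaces A's backward in-place index-shifting pass with a forward build-then-truncate
-- (append each element, twice if it equals k, then keep the first len(arr) items); objective: simpler.
-- A and B both mutate `arr` in place in Python (B via arr[:] = ...); the equivalence proved here is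
-- about the returned value, which in both programs is also the final state of `arr`.


-- ===== PORT A =====
-- arr[i] = v for 0 ≤ i < len(arr) (the only writes A performs; proved in-range by the invariant below)
def pvSetA (l : List Int) (i : Int) (v : Int) : List Int := l.set i.toNat v

-- the while loop of A: state (arr, write_index, curr); fuel = number of remaining iterations bound
-- (curr decreases by exactly 1 each iteration, so fuel = len(arr) at the top call suffices; the
-- fuel is only a totality guard, the loop condition is A's own `curr >= 0 and write_index >= 0`).
def dupLoopA (k n : Int) : Nat → List Int → Int → Int → List Int
  | 0, a, _, _ => a
  | fuel + 1, a, wi, curr =>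
    if 0 ≤ curr ∧ 0 ≤ wi then
      let a1 := if wi < n then pvSetA a wi (a.getD curr.toNat 0) else a
      let wi1 := wi - 1
      if a1.getD curr.toNat 0 = k then
        let a2 := if wi1 < n then pvSetA a1 wi1 k else a1
        dupLoopA k n fuel a2 (wi1 - 1) (curr - 1)
      else
        dupLoopA k n fuel a1 wi1 (curr - 1)
    else a

def duplicate_k (arr : List Int) (k : Int) : List Int :=
  let n : Int := arr.length
  let count : Int := PySem.List.count arr k
  dupLoopA k n arr.length arr (n + count - 1) (n - 1)

-- ===== PORT B =====
def duplicate_k_alt (arr : List Int) (k : Int) : List Int :=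
  let out := arr.foldl (fun acc x => (acc ++ [x]) ++ (if x = k then [x] else [])) []
  out.take arr.length

-- ===== PRECONDITION & SPEC =====
def Spec_duplicate_k (arr : List Int) (k : Int) (out : List Int) : Prop := out = duplicate_k_alt arr k
instance (arr : List Int) (k : Int) (out : List Int) : Decidable (Spec_duplicate_k arr k out) := by unfold Spec_duplicate_k; infer_instance

-- ===== CLAIM (what is proved, stated in full; the proofs are below) =====
def Claim_equal_duplicate_k : Prop := ∀ (arr : List Int) (k : Int), Dom_duplicate_k arr k → Spec_duplicate_k arr k (duplicate_k arr k)

-- ===== LEMMAS AND PROOFS =====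

-- the duplication of a list: each element, twice if it equals k
def dup (k : Int) (l : List Int) : List Int := l.flatMap (fun x => if x = k then [x, x] else [x])

theorem dup_cons (k : Int) (x : Int) (l : List Int) :
    dup k (x :: l) = (if x = k then [x, x] else [x]) ++ dup k l := by
  simp [dup]

-- B's foldl builds exactly dup
theorem foldl_dup (k : Int) (l acc : List Int) :
    l.foldl (fun acc x => (acc ++ [x]) ++ (if x = k then [x] else [])) acc = acc ++ dup k l := by
  induction l generalizing acc with
  | nil => simp [dup]
  | cons x t ih =>
    simp only [List.foldl_cons, ih, dup_cons]
    by_cases h : x = k <;> simp [h]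

-- "array state" abstraction: positions < j hold the original arr, the rest is the prefix of t
def stateL (arr : List Int) (j : Nat) (t : List Int) : List Int :=
  arr.take j ++ t.take (arr.length - j)

-- reading position m < j (and m < len arr) of the state gives the original element
theorem stateL_getD (arr : List Int) (j : Nat) (t : List Int) (m : Nat)
    (h1 : m < j) (h2 : m < arr.length) :
    (stateL arr j t).getD m 0 = arr.getD m 0 := by
  have hlt : m < (arr.take j).length := by simp; omega
  rw [stateL, List.getD_eq_getElem?_getD, List.getElem?_append_left hlt,
    List.getElem?_take_of_lt h1, ← List.getD_eq_getElem?_getD]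

-- reading position m ≤ j when the pending suffix starts with arr's own element at m
theorem stateL_getD' (arr : List Int) (j : Nat) (t : List Int) (m : Nat)
    (h1 : m ≤ j) (h2 : m < arr.length) :
    (stateL arr j (arr.getD m 0 :: t)).getD m 0 = arr.getD m 0 := by
  rcases Nat.lt_or_ge m j with h | h
  · exact stateL_getD arr j _ m h h2
  · have hj : j = m := by omega
    subst hj
    have hlen : (arr.take j).length = j := by simp; omega
    have hsub : arr.length - j = (arr.length - (j + 1)) + 1 := by omega
    rw [stateL, hsub, List.take_succ_cons, List.getD_eq_getElem?_getD,
      List.getElem?_append_right (by omega), hlen, Nat.sub_self]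
    rfl

-- one conditional write of A: writing v at index j (if j < n) onto stateL (j+1) t gives stateL j (v :: t)
theorem write_step (arr : List Int) (j : Nat) (t : List Int) (v : Int) :
    (if (j : Int) < (arr.length : Int) then pvSetA (stateL arr (j + 1) t) j v
      else stateL arr (j + 1) t) = stateL arr j (v :: t) := by
  by_cases h : j < arr.length
  · rw [if_pos (by exact_mod_cast h), pvSetA, Int.toNat_natCast, stateL, stateL,
      List.set_append, if_pos (by simp; omega),
      List.take_succ_eq_append_getElem h, List.set_append, if_neg (by simp)]
    have hsub : arr.length - j = (arr.length - (j + 1)) + 1 := by omega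
    rw [hsub, List.take_succ_cons]
    simp [Nat.min_eq_left h.le]
  · rw [if_neg (by exact_mod_cast h)]
    have t1 : arr.take (j + 1) = arr := List.take_of_length_le (by omega)
    have t2 : arr.take j = arr := List.take_of_length_le (by omega)
    have h1 : arr.length - (j + 1) = 0 := by omega
    have h2 : arr.length - j = 0 := by omega
    rw [stateL, stateL, t1, t2, h1, h2]
    simp

-- count of k in the first m elements
def cnt (arr : List Int) (k : Int) (m : Nat) : Nat := (arr.take m).count k

theorem cnt_succ (arr : List Int) (k : Int) (m : Nat)
    (hm : m < arr.length) :
    cnt arr k (m + 1) = cnt arr k m + (if arr.getD m 0 = k then 1 else 0) := by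
  rw [cnt, cnt, List.take_succ_eq_append_getElem hm, List.count_append]
  have : arr.getD m 0 = arr[m] := by
    rw [List.getD_eq_getElem?_getD, List.getElem?_eq_getElem hm]; rfl
  rw [this]
  simp [List.count_cons, List.count_nil]

-- the main loop invariant: running A's loop from the state for prefix length m yields take n (dup arr)
theorem loop_inv (arr : List Int) (k : Int) :
    ∀ (m : Nat), m ≤ arr.length →
      dupLoopA k (arr.length : Int) m
        (stateL arr (m + cnt arr k m) (dup k (arr.drop m)))
        ((m : Int) + (cnt arr k m : Int) - 1) ((m : Int) - 1)
      = (dup k arr).take arr.length := by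
  intro m
  induction m with
  | zero =>
    intro _
    simp [dupLoopA, stateL, cnt, dup]
  | succ m ih =>
    intro hm
    have hm' : m < arr.length := by omega
    have hdrop : arr.drop m = arr.getD m 0 :: arr.drop (m + 1) := by
      rw [List.drop_eq_getElem_cons hm']
      congr 1
      rw [List.getD_eq_getElem?_getD, List.getElem?_eq_getElem hm']; rfl
    have hcnt := cnt_succ arr k m hm'
    have hread : ∀ (j : Nat) (t : List Int), m < j → (stateL arr j t).getD m 0 = arr.getD m 0 :=
      fun j t hj => stateL_getD arr j t m hj hm'
    by_cases hk : arr.getD m 0 = k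
    · -- arr[m] = k : two writes this iteration
      have hc : cnt arr k (m + 1) = cnt arr k m + 1 := by rw [hcnt, if_pos hk]
      rw [hc]
      rw [dupLoopA, if_pos ⟨by push_cast; omega, by push_cast; omega⟩]
      have e1 : ((m : Int) + 1 + ((cnt arr k m : Int) + 1) - 1) = ((m + 1 + cnt arr k m : Nat) : Int) := by
        push_cast; ring
      have e2 : m + 1 + (cnt arr k m + 1) = (m + 1 + cnt arr k m) + 1 := by omega
      have hc1 : ((m : Int) + 1 - 1).toNat = m := by omega
      push_cast
      simp only [e2, hc1]
      rw [e1, hread (m + 1 + cnt arr k m + 1) (dup k (List.drop (m + 1) arr)) (by omega)]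
      rw [write_step arr (m + 1 + cnt arr k m) (dup k (List.drop (m + 1) arr)) (arr.getD m 0)]
      rw [hread (m + 1 + cnt arr k m) _ (by omega), if_pos hk]
      have e3 : ((m + 1 + cnt arr k m : Nat) : Int) - 1 = ((m + cnt arr k m : Nat) : Int) := by
        push_cast; ring
      rw [e3, show m + 1 + cnt arr k m = (m + cnt arr k m) + 1 from by omega]
      rw [write_step arr (m + cnt arr k m) (arr.getD m 0 :: dup k (List.drop (m + 1) arr)) k]
      have hdup : k :: arr.getD m 0 :: dup k (List.drop (m + 1) arr) = dup k (List.drop m arr) := by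
        rw [hdrop, dup_cons, if_pos hk, hk]
        simp
      rw [hdup]
      have e5 : ((m + cnt arr k m : Nat) : Int) - 1 = (m : Int) + (cnt arr k m : Int) - 1 := by
        push_cast; ring
      have e6 : (m : Int) + 1 - 1 - 1 = (m : Int) - 1 := by ring
      rw [e5, e6]
      exact ih (by omega)
    · -- arr[m] ≠ k : one write this iteration
      have hc : cnt arr k (m + 1) = cnt arr k m := by rw [hcnt, if_neg hk]; omega
      rw [hc]
      rw [dupLoopA, if_pos ⟨by push_cast; omega, by push_cast; omega⟩]
      have e1 : (m : Int) + 1 + (cnt arr k m : Int) - 1 = ((m + cnt arr k m : Nat) : Int) := by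
        push_cast; ring
      have hc1 : ((m : Int) + 1 - 1).toNat = m := by omega
      push_cast
      simp only [show m + 1 + cnt arr k m = (m + cnt arr k m) + 1 from by omega, hc1]
      rw [e1, hread (m + cnt arr k m + 1) (dup k (List.drop (m + 1) arr)) (by omega)]
      rw [write_step arr (m + cnt arr k m) (dup k (List.drop (m + 1) arr)) (arr.getD m 0)]
      rw [stateL_getD' arr (m + cnt arr k m) (dup k (List.drop (m + 1) arr)) m (by omega) hm']
      rw [if_neg hk]
      have hdup : arr.getD m 0 :: dup k (List.drop (m + 1) arr) = dup k (List.drop m arr) := by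
        rw [hdrop, dup_cons, if_neg hk]
        simp
      rw [hdup]
      have e5 : ((m + cnt arr k m : Nat) : Int) - 1 = (m : Int) + (cnt arr k m : Int) - 1 := by
        push_cast; ring
      have e6 : (m : Int) + 1 - 1 - 1 = (m : Int) - 1 := by ring
      rw [e5, e6]
      exact ih (by omega)

-- ===== VERDICT (by name: the statement is the Claim_ definition above) =====
theorem duplicate_k_spec : Claim_equal_duplicate_k := by
  intro arr k _
  show duplicate_k arr k = duplicate_k_alt arr k
  have hmain := loop_inv arr k arr.length (le_refl _)
  have hstate : stateL arr (arr.length + cnt arr k arr.length) (dup k (arr.drop arr.length)) = arr := by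
    simp [stateL, List.take_of_length_le (show arr.length ≤ arr.length + cnt arr k arr.length by omega)]
  rw [hstate] at hmain
  have hcnt : cnt arr k arr.length = List.count k arr := by
    simp [cnt]
  rw [hcnt] at hmain
  rw [duplicate_k, duplicate_k_alt, foldl_dup, List.nil_append, PySem.List.count_eq]
  show dupLoopA k (arr.length : Int) arr.length arr
      ((arr.length : Int) + (List.count k arr : Int) - 1) ((arr.length : Int) - 1)
    = (dup k arr).take arr.length
  convert hmain using 2
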